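-- pv_equiv track=rewrite | github.com/Joshuavtk/AI | week 4/E.py | count2
-- ===== SOURCE A (Python) =====
-- def count2(n, stay=True):
--     if n == 0:
--         return 1
--
--     if stay:
--         if n == 10: # only first step has 4 new directions (paths) otherwise add 3 new paths
--             return 4 * count2(n - 1, False)
--         return 3 * count2(n - 1, False)
--     else:
--         possible_routes = count2(n-1, True)
--
--         sum = 1 + count2(n - 1, False) + possible_routes
--
--         return sum
-- ===== SOURCE B (Python) =====
-- def count2(n, stay=True):
--     s, f = 1, 1  # s = count2(k, True), f = count2(k, False) after step k
--     for k in range(1, n + 1):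
--         s, f = (4 if k == 10 else 3) * f, 1 + f + s
--     return s if stay else f
-- ===== Notes on version B (the rewrite author's own statement) =====
-- stated objective: faster
-- what changed: replaces the exponential two-state recursion by a bottom-up loop carrying the pair (stay-value, non-stay-value); intended as asymptotically faster (timing: A timed out at n=16 where B returned; no clean ratio measurable)
import Mathlib
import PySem

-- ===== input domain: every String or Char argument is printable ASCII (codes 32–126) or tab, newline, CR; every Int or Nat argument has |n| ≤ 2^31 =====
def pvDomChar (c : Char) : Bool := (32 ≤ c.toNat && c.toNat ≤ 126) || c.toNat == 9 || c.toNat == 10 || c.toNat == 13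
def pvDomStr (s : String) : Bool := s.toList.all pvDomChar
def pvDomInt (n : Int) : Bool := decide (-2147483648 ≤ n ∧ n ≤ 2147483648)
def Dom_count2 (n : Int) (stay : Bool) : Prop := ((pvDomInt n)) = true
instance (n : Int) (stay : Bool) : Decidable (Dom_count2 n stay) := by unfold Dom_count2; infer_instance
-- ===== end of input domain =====

-- B replaces A's two-state recursion by a bottom-up loop over a pair; intended as faster (timing: A timed out at n=16 where B returned; no ratio measurable). Equivalence is on n ≥ 0; A raises RecursionError for n < 0.

-- ===== PORT A =====
-- A recurses on n - 1 until n == 0; on n ≥ 0 this is structural recursion on n,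
-- written here on n.toNat (Pre_ restricts to n ≥ 0, where this is exact).
def count2A : Nat → Bool → Int
  | 0, _ => 1
  | k + 1, true => if (k + 1 : Nat) = 10 then 4 * count2A k false else 3 * count2A k false
  | k + 1, false =>
      let possible_routes := count2A k true
      1 + count2A k false + possible_routes

def count2 (n : Int) (stay : Bool) : Int := count2A n.toNat stay

-- ===== PORT B =====
def count2_alt (n : Int) (stay : Bool) : Int :=
  let sf := (List.range n.toNat).foldl
    (fun (sf : Int × Int) (k' : Nat) =>
      ((if k' + 1 = 10 then 4 else 3) * sf.2, 1 + sf.2 + sf.1))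
    (1, 1)
  if stay then sf.1 else sf.2

-- ===== PRECONDITION & SPEC =====
-- Pre_ excludes n < 0, on which A recurses forever (RecursionError).
def Pre_count2 (n : Int) (stay : Bool) : Prop := 0 ≤ n
instance (n : Int) (stay : Bool) : Decidable (Pre_count2 n stay) := by unfold Pre_count2; infer_instance
def pvWitness_count2 : Int × Bool := (5, true)

def Spec_count2 (n : Int) (stay : Bool) (out : Int) : Prop := out = count2_alt n stay
instance (n : Int) (stay : Bool) (out : Int) : Decidable (Spec_count2 n stay out) := by unfold Spec_count2; infer_instance

-- ===== CLAIM (what is proved, stated in full; the proofs are below) =====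
def Claim_equal_count2 : Prop := ∀ (n : Int) (stay : Bool), Dom_count2 n stay → Pre_count2 n stay → Spec_count2 n stay (count2 n stay)

-- ===== LEMMAS AND PROOFS =====
-- Invariant: after the loop has processed range m, the state is exactly
-- (count2A m true, count2A m false).
theorem count2_fold_inv (m : Nat) :
    (List.range m).foldl
      (fun (sf : Int × Int) (k' : Nat) =>
        ((if k' + 1 = 10 then 4 else 3) * sf.2, 1 + sf.2 + sf.1))
      (1, 1) = (count2A m true, count2A m false) := by
  induction m with
  | zero => simp [count2A]
  | succ k ih =>
      rw [List.range_succ, List.foldl_append, ih]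
      simp only [List.foldl_cons, List.foldl_nil, count2A]
      by_cases h : k + 1 = 10 <;> simp [h]

-- ===== VERDICT (by name: the statement is the Claim_ definition above) =====
theorem count2_spec : Claim_equal_count2 := by
  intro n stay _ _
  unfold Spec_count2 count2 count2_alt
  rw [count2_fold_inv]
  cases stay <;> rfl
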